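-- pv_equiv track=rewrite | github.com/Felerius/aoc2017 | day20.py | simulate_tick
-- ===== SOURCE A (Python) =====
-- import collections
--
-- def simulate_tick(particles):
--     position_counts = collections.defaultdict(int)
--     moved_particles = []
--     for pos, vel, acc in particles:
--         vel = tuple(i + j for i, j in zip(vel, acc))
--         pos = tuple(i + j for i, j in zip(pos, vel))
--         moved_particles.append((pos, vel, acc))
--         position_counts[pos] += 1
--     return ((pos, vel, acc) for pos, vel, acc in moved_particles if
--             position_counts[pos] == 1)
-- ===== SOURCE B (Python) =====
-- def simulate_tick(particles):
--     def move(pos, vel, acc):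
--         vel = tuple(v + a for v, a in zip(vel, acc))
--         return tuple(p + v for p, v in zip(pos, vel)), vel, acc
--
--     moved = [move(*p) for p in particles]
--     return (m for i, m in enumerate(moved)
--             if all(j == i or q[0] != m[0] for j, q in enumerate(moved)))
-- ===== Notes on version B (the rewrite author's own statement) =====
-- stated objective: alternative
-- what changed: Drops A's position-count dictionary entirely: B moves all particles in one mapped pass and then keeps a particle by a pairwise brute-force check (no other moved particle shares its new position), trading A's hash counting for direct comparison.
import Mathlib
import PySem

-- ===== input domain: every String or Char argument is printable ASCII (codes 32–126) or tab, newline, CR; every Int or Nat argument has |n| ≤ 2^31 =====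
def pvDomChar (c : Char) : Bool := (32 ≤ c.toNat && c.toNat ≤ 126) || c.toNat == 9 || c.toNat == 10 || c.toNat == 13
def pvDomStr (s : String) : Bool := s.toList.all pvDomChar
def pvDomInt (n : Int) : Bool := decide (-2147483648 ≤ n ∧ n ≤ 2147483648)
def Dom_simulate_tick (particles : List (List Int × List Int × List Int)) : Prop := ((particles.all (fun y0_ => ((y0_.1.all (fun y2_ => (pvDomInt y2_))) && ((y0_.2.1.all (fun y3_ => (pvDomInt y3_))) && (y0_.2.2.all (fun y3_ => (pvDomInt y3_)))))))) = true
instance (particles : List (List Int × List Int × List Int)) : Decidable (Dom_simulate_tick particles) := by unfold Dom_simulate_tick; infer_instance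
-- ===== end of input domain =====

-- B drops A's position-count dictionary: it moves all particles in one mapped pass and keeps a
-- particle by a pairwise brute-force check that no other moved particle shares its new position
-- (alternative algorithm, not claimed faster).

-- movement of one particle (both Pythons contain these two identical lines):
-- vel = tuple(i+j for i,j in zip(vel, acc)); pos = tuple(i+j for i,j in zip(pos, vel))
def pvMove (q : List Int × List Int × List Int) : List Int × List Int × List Int :=
  let vel := (q.2.1.zip q.2.2).map (fun ij => ij.1 + ij.2)
  let pos := (q.1.zip vel).map (fun ij => ij.1 + ij.2)
  (pos, vel, q.2.2)

-- ===== PORT A =====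
def simulate_tick (particles : List (List Int × List Int × List Int)) : List (List Int × List Int × List Int) :=
  -- position_counts = defaultdict(int); moved_particles = []; the loop appends and counts
  let st := particles.foldl
    (fun (st : List (List Int × List Int × List Int) × PySem.Dict (List Int) Int) q =>
      let m := pvMove q
      (st.1 ++ [m], st.2.insert m.1 (st.2.getD m.1 0 + 1)))
    ([], PySem.Dict.empty)
  -- the returned generator: moved particles whose position count is 1
  st.1.filter (fun m => st.2.getD m.1 0 == 1)

-- ===== PORT B =====
def simulate_tick_alt (particles : List (List Int × List Int × List Int)) : List (List Int × List Int × List Int) :=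
  -- moved = [move(*p) for p in particles]
  let moved := particles.map pvMove
  -- (m for i, m in enumerate(moved) if all(j == i or q[0] != m[0] for j, q in enumerate(moved)))
  (PySem.List.enumerate moved).filterMap (fun im =>
    if (PySem.List.enumerate moved).all (fun jq => jq.1 == im.1 || !(jq.2.1 == im.2.1))
    then some im.2 else none)

-- ===== PRECONDITION & SPEC =====
def Spec_simulate_tick (particles : List (List Int × List Int × List Int)) (out : List (List Int × List Int × List Int)) : Prop := out = simulate_tick_alt particles
instance (particles : List (List Int × List Int × List Int)) (out : List (List Int × List Int × List Int)) : Decidable (Spec_simulate_tick particles out) := by unfold Spec_simulate_tick; infer_instance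

-- ===== CLAIM (what is proved, stated in full; the proofs are below) =====
def Claim_equal_simulate_tick : Prop := ∀ (particles : List (List Int × List Int × List Int)), Dom_simulate_tick particles → Spec_simulate_tick particles (simulate_tick particles)

-- ===== LEMMAS AND PROOFS =====

abbrev PK := List Int
abbrev PP := List Int × List Int × List Int

-- A's loop separates: the list accumulator collects the moved particles, the
-- counter accumulator is the position-count loop over their positions
theorem pvA_fold : ∀ (ps : List PP) (acc : List PP) (d : PySem.Dict PK Int),
    ps.foldl (fun st q =>
        let m := pvMove q
        (st.1 ++ [m], st.2.insert m.1 (st.2.getD m.1 0 + 1))) (acc, d)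
      = (acc ++ ps.map pvMove,
         ((ps.map pvMove).map (fun x => x.1)).foldl (fun d k => d.insert k (d.getD k 0 + 1)) d) := by
  intro ps
  induction ps with
  | nil => intro acc d; simp
  | cons m t ih => intro acc d; simp [ih]

-- filterMap of an if-some-else-none is map-of-filter
theorem pvFilterMap_if : ∀ (E : List (Int × PP)) (p : Int × PP → Bool),
    E.filterMap (fun x => if p x then some x.2 else none) = (E.filter p).map (fun x => x.2) := by
  intro E p
  induction E with
  | nil => rfl
  | cons x t ih =>
    simp only [List.filterMap_cons, List.filter_cons]
    by_cases h : p x = true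
    · simp [h, ih]
    · simp [h, ih]

-- for an element (i, m) of a list of index-tagged particles with strictly increasing
-- indices, "every entry has index i or a different position" is "exactly one entry
-- (necessarily (i, m) itself) has position m.1"
theorem pvAll_iff : ∀ (E : List (Int × PP)) (i : Int) (m : PP),
    E.Pairwise (fun p q => p.1 < q.1) → (i, m) ∈ E →
    ((E.all (fun jq => jq.1 == i || !(jq.2.1 == m.1))) = true
      ↔ E.countP (fun jq => jq.2.1 == m.1) = 1) := by
  intro E
  induction E with
  | nil => intro i m _ h; cases h
  | cons x t ih =>
    intro i m hpw hmem
    obtain ⟨hlt, hpw'⟩ := List.pairwise_cons.mp hpw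
    rw [List.mem_cons] at hmem
    rcases hmem with hhead | htail
    · -- (i, m) is the head: x = (i, m)
      subst hhead
      have hne : ∀ jq ∈ t, (jq.1 == i) = false := by
        intro jq hjq
        simpa using (ne_of_gt (hlt jq hjq))
      simp only [List.all_cons, List.countP_cons]
      have hx : ((i, m).1 == i || !((i, m).2.1 == m.1)) = true := by simp
      rw [hx, Bool.true_and]
      have hpm : (fun (jq : Int × PP) => jq.2.1 == m.1) (i, m) = true := by simp
      rw [if_pos hpm]
      constructor
      · intro hall
        have : t.countP (fun jq => jq.2.1 == m.1) = 0 := by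
          rw [List.countP_eq_zero]
          intro jq hjq
          have := (List.all_eq_true.mp hall) jq hjq
          rw [hne jq hjq] at this
          simpa using this
        omega
      · intro hc
        have hc0 : t.countP (fun jq => jq.2.1 == m.1) = 0 := by omega
        rw [List.all_eq_true]
        intro jq hjq
        have := (List.countP_eq_zero.mp hc0) jq hjq
        simp only [Bool.or_eq_true, Bool.not_eq_true']
        right
        simpa using this
    · -- (i, m) is in the tail
      have hxi : (x.1 == i) = false := by
        have : x.1 < (i, m).1 := hlt (i, m) htail
        simpa using (ne_of_lt this)
      simp only [List.all_cons, List.countP_cons, hxi, Bool.false_or]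
      rw [Bool.and_eq_true, ih i m hpw' htail]
      by_cases hxp : (x.2.1 == m.1) = true
      · have h1 : 1 ≤ t.countP (fun jq => jq.2.1 == m.1) :=
          List.countP_pos_iff.mpr ⟨(i, m), htail, by simp⟩
        rw [if_pos hxp]
        constructor
        · rintro ⟨h, -⟩
          rw [hxp] at h
          cases h
        · intro h
          omega
      · rw [if_neg hxp]
        simp [hxp]

theorem simulate_tick_main : ∀ (particles : List (List Int × List Int × List Int)),
    simulate_tick particles = simulate_tick_alt particles := by
  intro particles
  unfold simulate_tick simulate_tick_alt
  rw [pvA_fold, pvFilterMap_if]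
  set M := particles.map pvMove with hM
  simp only [List.nil_append]
  have hA : List.filter
        (fun m => ((M.map (fun x => x.1)).foldl (fun d k => d.insert k (d.getD k 0 + 1))
            (PySem.Dict.empty : PySem.Dict (List Int) Int)).getD m.1 0 == 1) M
      = M.filter (fun m => (M.map (fun x => x.1)).count m.1 == 1) := by
    apply List.filter_congr
    intro m _
    rw [PySem.Dict.getD_foldl_insert_add_one]
    have h0 : (PySem.Dict.empty : PySem.Dict PK Int).getD m.1 0 = 0 := rfl
    rw [h0, Int.zero_add, Bool.eq_iff_iff]
    simp only [beq_iff_eq]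
    omega
  have hB : List.filter
        (fun im => (PySem.List.enumerate M).all (fun jq => jq.1 == im.1 || !(jq.2.1 == im.2.1)))
        (PySem.List.enumerate M)
      = List.filter (fun im => (M.map (fun x => x.1)).count im.2.1 == 1) (PySem.List.enumerate M) := by
    apply List.filter_congr
    intro im hmem
    rw [Bool.eq_iff_iff, beq_iff_eq]
    have hpw : (PySem.List.enumerate M).Pairwise (fun p q => p.1 < q.1) :=
      PySem.List.pairwise_lt_enumerate M 0
    have hmem' : (im.1, im.2) ∈ PySem.List.enumerate M := by simpa using hmem
    rw [pvAll_iff (PySem.List.enumerate M) im.1 im.2 hpw hmem']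
    have hc : (PySem.List.enumerate M).countP (fun jq => jq.2.1 == im.2.1)
        = (M.map (fun x => x.1)).count im.2.1 := by
      conv_rhs => rw [show M = (PySem.List.enumerate M).map (fun x => x.2) from
        (PySem.List.map_snd_enumerate M 0).symm]
      rw [List.count_eq_countP, List.countP_map, List.countP_map]
      rfl
    rw [hc]
  rw [hA, hB]
  rw [show (fun (im : Int × PP) => (M.map (fun x => x.1)).count im.2.1 == 1)
      = (fun m => (M.map (fun x => x.1)).count m.1 == 1) ∘ (fun (x : Int × PP) => x.2) from rfl,
    ← List.filter_map, PySem.List.map_snd_enumerate]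

-- ===== VERDICT (by name: the statement is the Claim_ definition above) =====
theorem simulate_tick_spec : Claim_equal_simulate_tick := by
  intro particles _
  exact simulate_tick_main particles
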